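-- pv_equiv track=rewrite | github.com/quidditymaster/thimbles | thimblesgui/ew_editor.py | sparse_indexes_to_dense_bounds
-- ===== SOURCE A (Python) =====
-- def sparse_indexes_to_dense_bounds(sparse_indexes, forced_breaks):
--     fb_set = set(forced_breaks)
--     bounds = []
--     clb = None
--     for i in range(len(sparse_indexes)-1):
--         cind = sparse_indexes[i]
--         if clb is None:
--             clb = cind
--         if (sparse_indexes[i+1] - cind) > 1:
--             bounds.append((clb, cind))
--             clb = None
--         elif cind in fb_set:
--             bounds.append((clb, cind))
--             clb = cind
--     return bounds
-- ===== SOURCE B (Python) =====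
-- def _segments(run, fb):
--     start = run[0]
--     out = []
--     for v in run[:-1]:
--         if v in fb:
--             out.append((start, v))
--             start = v
--     return out, start
--
-- def _closed_run_bounds(run, fb):
--     out, start = _segments(run, fb)
--     return out + [(start, run[-1])]
--
-- def _open_run_bounds(run, fb):
--     out, _ = _segments(run, fb)
--     return out
--
-- def sparse_indexes_to_dense_bounds(sparse_indexes, forced_breaks):
--     if not sparse_indexes:
--         return []
--     fb = set(forced_breaks)
--     # phase 1: split into maximal runs of consecutive indexes
--     runs = []
--     cur = [sparse_indexes[0]]
--     for v in sparse_indexes[1:]: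
--         if v - cur[-1] > 1:
--             runs.append(cur)
--             cur = [v]
--         else:
--             cur.append(v)
--     runs.append(cur)
--     # phase 2: emit bounds per run; the final (open-tail) run is never closed
--     bounds = []
--     for run in runs[:-1]:
--         bounds.extend(_closed_run_bounds(run, fb))
--     bounds.extend(_open_run_bounds(runs[-1], fb))
--     return bounds
-- ===== Notes on version B (the rewrite author's own statement) =====
-- stated objective: alternative
-- what changed: A's single pass with a clb/None sentinel state machine is replaced by a two-phase decomposition: first split the indexes into maximal runs of consecutive integers, then emit (start, break) bounds per run, closing every run except the final open tail.
import Mathlib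
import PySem

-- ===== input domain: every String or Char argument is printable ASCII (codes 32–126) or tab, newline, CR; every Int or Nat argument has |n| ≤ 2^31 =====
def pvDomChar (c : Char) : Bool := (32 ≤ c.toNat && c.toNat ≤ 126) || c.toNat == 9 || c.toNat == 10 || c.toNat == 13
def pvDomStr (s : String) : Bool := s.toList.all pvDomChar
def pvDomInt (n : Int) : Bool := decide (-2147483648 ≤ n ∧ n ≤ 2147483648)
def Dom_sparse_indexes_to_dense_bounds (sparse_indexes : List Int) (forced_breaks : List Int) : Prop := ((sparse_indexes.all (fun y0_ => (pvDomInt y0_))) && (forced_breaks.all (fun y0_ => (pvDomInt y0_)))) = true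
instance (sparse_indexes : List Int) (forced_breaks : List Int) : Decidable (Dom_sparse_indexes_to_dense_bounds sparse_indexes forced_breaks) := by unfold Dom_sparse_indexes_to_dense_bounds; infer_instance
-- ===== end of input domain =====

-- B replaces A's single-pass clb/None state machine by a two-phase decomposition (split into maximal
-- consecutive runs, then emit per-run bounds); objective: alternative structure, same cost.

-- ===== PORT A =====
-- A's loop over i in range(len-1) reads sparse_indexes[i], sparse_indexes[i+1]; the obvious
-- structural recursion over the same traversal: state = (clb : Option Int, bounds accumulator).
def pvLoopA (fb : PySem.Set Int) : List Int → Option Int → List (Int × Int) → List (Int × Int)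
  | c :: d :: rest, clb, acc =>
    let clb' := clb.getD c
    if d - c > 1 then pvLoopA fb (d :: rest) none (acc ++ [(clb', c)])
    else if PySem.Set.contains fb c then pvLoopA fb (d :: rest) (some c) (acc ++ [(clb', c)])
    else pvLoopA fb (d :: rest) (some clb') acc
  | _, _, acc => acc

def sparse_indexes_to_dense_bounds (sparse_indexes : List Int) (forced_breaks : List Int) : List (Int × Int) :=
  pvLoopA (PySem.Set.ofList forced_breaks) sparse_indexes none []

-- ===== PORT B =====
-- phase 1 of Source B: split into maximal runs of consecutive indexes (state = finished runs, current run)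
def pvSplitRuns : List Int → List (List Int) → List Int → List (List Int)
  | [], runs, cur => runs ++ [cur]
  | v :: vs, runs, cur =>
    if v - cur.getLastD 0 > 1 then pvSplitRuns vs (runs ++ [cur]) [v]
    else pvSplitRuns vs runs (cur ++ [v])

-- _segments of Source B
def pvSegments (fb : PySem.Set Int) (run : List Int) : List (Int × Int) × Int :=
  run.dropLast.foldl
    (fun st v => if PySem.Set.contains fb v then (st.1 ++ [(st.2, v)], v) else st)
    ([], run.headD 0)

-- _closed_run_bounds of Source B
def pvClosedRunBounds (fb : PySem.Set Int) (run : List Int) : List (Int × Int) :=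
  let st := pvSegments fb run
  st.1 ++ [(st.2, run.getLastD 0)]

-- _open_run_bounds of Source B
def pvOpenRunBounds (fb : PySem.Set Int) (run : List Int) : List (Int × Int) :=
  (pvSegments fb run).1

def sparse_indexes_to_dense_bounds_alt (sparse_indexes : List Int) (forced_breaks : List Int) : List (Int × Int) :=
  match sparse_indexes with
  | [] => []
  | x :: rest =>
    let fb := PySem.Set.ofList forced_breaks
    let runs := pvSplitRuns rest [] [x]
    (runs.dropLast.foldl (fun acc run => acc ++ pvClosedRunBounds fb run) []) ++
      pvOpenRunBounds fb (runs.getLastD [])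

-- ===== PRECONDITION & SPEC =====
def Spec_sparse_indexes_to_dense_bounds (sparse_indexes : List Int) (forced_breaks : List Int) (out : List (Int × Int)) : Prop := out = sparse_indexes_to_dense_bounds_alt sparse_indexes forced_breaks
instance (sparse_indexes : List Int) (forced_breaks : List Int) (out : List (Int × Int)) : Decidable (Spec_sparse_indexes_to_dense_bounds sparse_indexes forced_breaks out) := by unfold Spec_sparse_indexes_to_dense_bounds; infer_instance

-- ===== CLAIM (what is proved, stated in full; the proofs are below) =====
def Claim_equal_sparse_indexes_to_dense_bounds : Prop := ∀ (sparse_indexes : List Int) (forced_breaks : List Int), Dom_sparse_indexes_to_dense_bounds sparse_indexes forced_breaks → Spec_sparse_indexes_to_dense_bounds sparse_indexes forced_breaks (sparse_indexes_to_dense_bounds sparse_indexes forced_breaks)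

-- ===== LEMMAS AND PROOFS =====

theorem pvLoopA_acc (fb : PySem.Set Int) (xs : List Int) (clb : Option Int) (acc : List (Int × Int)) :
    pvLoopA fb xs clb acc = acc ++ pvLoopA fb xs clb [] := by
  induction xs generalizing clb acc with
  | nil => simp [pvLoopA]
  | cons c t ih =>
    cases t with
    | nil => simp [pvLoopA]
    | cons d rest =>
      simp only [pvLoopA]
      split_ifs with h1 h2
      · rw [ih]; conv_rhs => rw [ih]
        simp
      · rw [ih]; conv_rhs => rw [ih]
        simp
      · rw [ih]

theorem pvLoopA_none (fb : PySem.Set Int) (c : Int) (vs : List Int) (acc : List (Int × Int)) :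
    pvLoopA fb (c :: vs) none acc = pvLoopA fb (c :: vs) (some c) acc := by
  cases vs with
  | nil => simp [pvLoopA]
  | cons d rest => simp [pvLoopA]

theorem pvSplitRuns_append (vs : List Int) (runs : List (List Int)) (cur : List Int) :
    pvSplitRuns vs runs cur = runs ++ pvSplitRuns vs [] cur := by
  induction vs generalizing runs cur with
  | nil => simp [pvSplitRuns]
  | cons v vs' ih =>
    simp only [pvSplitRuns]
    split_ifs with h
    · rw [ih]; conv_rhs => rw [ih]
      simp
    · rw [ih]

theorem pvSplitRuns_ne_nil (vs : List Int) (cur : List Int) : pvSplitRuns vs [] cur ≠ [] := by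
  induction vs generalizing cur with
  | nil => simp [pvSplitRuns]
  | cons v vs' ih =>
    simp only [pvSplitRuns]
    split_ifs with h
    · rw [pvSplitRuns_append]; simp
    · exact ih _

theorem getLastD_cons_of_ne_nil {α : Type} (a d : α) (l : List α) (h : l ≠ []) :
    (a :: l).getLastD d = l.getLastD d := by
  cases l with
  | nil => exact absurd rfl h
  | cons b t => simp

theorem headD_append_of_ne_nil {α : Type} (l : List α) (v d : α) (h : l ≠ []) :
    (l ++ [v]).headD d = l.headD d := by
  cases l with
  | nil => exact absurd rfl h
  | cons a t => rfl

theorem getLastD_eq_getLast' (l : List Int) (h : l ≠ []) : l.getLastD 0 = l.getLast h := by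
  cases l with
  | nil => exact absurd rfl h
  | cons a t => simp [List.getLastD_eq_getLast?, List.getLast?_eq_some_getLast]

theorem pvSegments_snoc (fb : PySem.Set Int) (run : List Int) (v : Int) (h : run ≠ []) :
    pvSegments fb (run ++ [v]) =
      (if PySem.Set.contains fb (run.getLastD 0)
       then ((pvSegments fb run).1 ++ [((pvSegments fb run).2, run.getLastD 0)], run.getLastD 0)
       else pvSegments fb run) := by
  unfold pvSegments
  rw [List.dropLast_concat, headD_append_of_ne_nil run v 0 h]
  generalize (([], run.headD 0) : List (Int × Int) × Int) = init
  conv_lhs => rw [← List.dropLast_append_getLast h]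
  rw [List.foldl_append]
  simp only [List.foldl_cons, List.foldl_nil]
  rw [← getLastD_eq_getLast' run h]

-- the central invariant: phase-1 state (pending run `cur`) vs A's loop state (clb = current segment start)
theorem pvMain (fb : PySem.Set Int) (vs : List Int) : ∀ (cur : List Int), cur ≠ [] →
    (pvSplitRuns vs [] cur).dropLast.flatMap (pvClosedRunBounds fb) ++
        pvOpenRunBounds fb ((pvSplitRuns vs [] cur).getLastD [])
      = (pvSegments fb cur).1 ++ pvLoopA fb (cur.getLastD 0 :: vs) (some (pvSegments fb cur).2) [] := by
  induction vs with
  | nil =>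
    intro cur hcur
    simp [pvSplitRuns, pvOpenRunBounds, pvLoopA]
  | cons v vs' ih =>
    intro cur hcur
    simp only [pvSplitRuns]
    split_ifs with hgap
    · -- gap after cur: cur is finished as a closed run, the next run starts fresh at v
      rw [pvSplitRuns_append]
      have hne := pvSplitRuns_ne_nil vs' [v]
      simp only [List.nil_append, List.singleton_append]
      rw [List.dropLast_cons_of_ne_nil hne, getLastD_cons_of_ne_nil _ _ _ hne]
      rw [List.flatMap_cons, List.append_assoc, ih [v] (by simp)]
      have hseg : pvSegments fb [v] = ([], v) := by simp [pvSegments]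
      rw [hseg]
      have hstep : pvLoopA fb (cur.getLastD 0 :: v :: vs') (some (pvSegments fb cur).2) [] =
          [((pvSegments fb cur).2, cur.getLastD 0)] ++ pvLoopA fb (v :: vs') none [] := by
        simp only [pvLoopA, if_pos hgap, Option.getD_some]
        rw [pvLoopA_acc]
        simp
      rw [hstep, pvLoopA_none]
      simp [pvClosedRunBounds]
    · -- no gap: v joins the pending run
      rw [ih (cur ++ [v]) (by simp), List.getLastD_concat,
          pvSegments_snoc fb cur v hcur]
      have hstep : pvLoopA fb (cur.getLastD 0 :: v :: vs') (some (pvSegments fb cur).2) [] =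
          if PySem.Set.contains fb (cur.getLastD 0)
          then [((pvSegments fb cur).2, cur.getLastD 0)] ++ pvLoopA fb (v :: vs') (some (cur.getLastD 0)) []
          else pvLoopA fb (v :: vs') (some (pvSegments fb cur).2) [] := by
        simp only [pvLoopA, if_neg hgap, Option.getD_some]
        split_ifs with hfb
        · rw [pvLoopA_acc]
          simp
        · rfl
      rw [hstep]
      split_ifs with hfb <;> simp

-- ===== VERDICT (by name: the statement is the Claim_ definition above) =====
theorem sparse_indexes_to_dense_bounds_spec : Claim_equal_sparse_indexes_to_dense_bounds := by
  unfold Claim_equal_sparse_indexes_to_dense_bounds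
  intro xs fbs _
  unfold Spec_sparse_indexes_to_dense_bounds
  cases xs with
  | nil => rfl
  | cons x rest =>
    show pvLoopA (PySem.Set.ofList fbs) (x :: rest) none [] =
      (pvSplitRuns rest [] [x]).dropLast.foldl
          (fun acc run => acc ++ pvClosedRunBounds (PySem.Set.ofList fbs) run) [] ++
        pvOpenRunBounds (PySem.Set.ofList fbs) ((pvSplitRuns rest [] [x]).getLastD [])
    rw [PySem.List.foldl_append_eq_flatMap, List.nil_append,
        pvMain (PySem.Set.ofList fbs) rest [x] (by simp)]
    have hseg : pvSegments (PySem.Set.ofList fbs) [x] = ([], x) := by simp [pvSegments]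
    rw [hseg, pvLoopA_none]
    simp
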